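-- pv_equiv track=rewrite | github.com/sushma8328/pythontest | strings.py | reverse_a_string
-- ===== SOURCE A (Python) =====
-- def reverse_a_string(s):
-- 	final_string = ''
-- 	if(len(s) % 4 == 0):
-- 		for i in range(len(s)):
-- 			i = -i - 1
-- 			final_string = final_string + s[i]
-- 	else:
-- 		return s
-- 	return final_string
-- ===== SOURCE B (Python) =====
-- def reverse_a_string(s):
--     if len(s) % 4 == 0:
--         return s[::-1]
--     return s
-- ===== Notes on version B (the rewrite author's own statement) =====
-- stated objective: idiomatic
-- what changed: Replaces the index loop that builds the reversed string one character at a time by negative indexing with a single slice s[::-1], eliminating the explicit loop and the quadratic string concatenation.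
import Mathlib
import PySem

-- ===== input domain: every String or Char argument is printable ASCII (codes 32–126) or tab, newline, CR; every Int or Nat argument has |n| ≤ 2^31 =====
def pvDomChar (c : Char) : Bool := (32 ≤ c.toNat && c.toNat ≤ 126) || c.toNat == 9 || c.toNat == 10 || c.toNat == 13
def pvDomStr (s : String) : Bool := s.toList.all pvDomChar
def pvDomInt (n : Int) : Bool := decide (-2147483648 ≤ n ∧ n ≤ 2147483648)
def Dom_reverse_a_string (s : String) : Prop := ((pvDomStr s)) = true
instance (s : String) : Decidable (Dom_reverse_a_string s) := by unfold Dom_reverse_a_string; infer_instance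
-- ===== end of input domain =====

-- B replaces A's character-by-character loop (negative indexing, repeated concatenation) by the single slice s[::-1]; objective: idiomatic.

-- ===== PORT A =====
-- for i in range(len(s)): i = -i - 1; final_string = final_string + s[i]
def reverse_a_string (s : String) : String :=
  if PySem.Int.mod (PySem.Str.len s) 4 = 0 then
    String.ofList ((PySem.List.pyRange 0 (PySem.Str.len s) 1).foldl
      (fun acc i => acc ++ (PySem.Str.pyGet? s (-i - 1)).toList) [])
  else s

-- ===== PORT B =====
-- return s[::-1] if len(s) % 4 == 0 else s
def reverse_a_string_alt (s : String) : String :=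
  if PySem.Int.mod (PySem.Str.len s) 4 = 0 then
    (PySem.Str.slice? s none none (-1)).getD s
  else s

-- ===== PRECONDITION & SPEC =====
def Spec_reverse_a_string (s : String) (out : String) : Prop := out = reverse_a_string_alt s
instance (s : String) (out : String) : Decidable (Spec_reverse_a_string s out) := by unfold Spec_reverse_a_string; infer_instance

-- ===== CLAIM (what is proved, stated in full; the proofs are below) =====
def Claim_equal_reverse_a_string : Prop := ∀ (s : String), Dom_reverse_a_string s → Spec_reverse_a_string s (reverse_a_string s)

-- ===== LEMMAS AND PROOFS =====

-- A's loop after k steps has built the first k characters of the reversed list.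
theorem pv_foldA (cs : List Char) (k : Nat) (hk : k ≤ cs.length) :
    (PySem.List.pyRange 0 (k : Int) 1).foldl
      (fun acc i => acc ++ (PySem.List.pyGet? cs (-i - 1)).toList) [] = cs.reverse.take k := by
  induction k with
  | zero => simp [PySem.List.pyRange_one_eq_nil]
  | succ k ih =>
    have hk' : k ≤ cs.length := Nat.le_of_succ_le hk
    have hsplit : PySem.List.pyRange 0 ((k + 1 : Nat) : Int) 1
        = PySem.List.pyRange 0 (k : Int) 1 ++ [(k : Int)] := by
      have := PySem.List.pyRange_one_succ_right (a := 0) (b := (k : Int)) (by positivity)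
      push_cast
      simpa using this
    rw [hsplit, List.foldl_append, ih hk']
    have hget : PySem.List.pyGet? cs (-(k : Int) - 1) = some cs[cs.length - (k + 1)] := by
      have h2 := PySem.List.pyGet?_neg_natCast (xs := cs) (k := k + 1) (Nat.succ_pos k) hk
      rw [show (-((k+1 : Nat) : Int)) = -(k : Int) - 1 by push_cast; ring] at h2
      rw [h2, List.getElem?_eq_getElem (by omega)]
    simp only [List.foldl_cons, List.foldl_nil, hget, Option.toList_some]
    have hrev : cs.reverse.take (k + 1) = cs.reverse.take k ++ [cs.reverse[k]'(by simpa using hk)] := by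
      exact List.take_succ_eq_append_getElem (by simpa using hk)
    rw [hrev]
    congr 1
    rw [List.getElem_reverse]
    have hidx : cs.length - (k + 1) = cs.length - 1 - k := by omega
    simp [hidx]

theorem pv_ports_eq (s : String) : reverse_a_string s = reverse_a_string_alt s := by
  unfold reverse_a_string reverse_a_string_alt
  by_cases h : PySem.Int.mod (PySem.Str.len s) 4 = 0
  · rw [if_pos h, if_pos h, PySem.Str.slice?_none_none_neg_one, Option.getD_some]
    have hlen : PySem.Str.len s = (s.toList.length : Int) := by simp [PySem.Str.len_eq]
    rw [hlen]
    have hfold : (PySem.List.pyRange 0 ((s.toList.length : Int)) 1).foldl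
        (fun acc i => acc ++ (PySem.Str.pyGet? s (-i - 1)).toList) [] = s.toList.reverse := by
      have hstep : (fun (acc : List Char) (i : Int) => acc ++ (PySem.Str.pyGet? s (-i - 1)).toList)
          = fun acc i => acc ++ (PySem.List.pyGet? s.toList (-i - 1)).toList := by
        funext acc i; simp [PySem.Str.pyGet?_eq]
      rw [hstep, pv_foldA s.toList s.toList.length le_rfl]
      simp
    rw [hfold]
  · rw [if_neg h, if_neg h]

-- ===== VERDICT (by name: the statement is the Claim_ definition above) =====
theorem reverse_a_string_spec : Claim_equal_reverse_a_string := by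
  intro s _
  exact pv_ports_eq s
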